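-- pv_equiv track=rewrite | github.com/vsen-1710/Opensanction_api | services/opensanctions_service.py | _determine_sanctions_type
-- ===== SOURCE A (Python) =====
-- from typing import Dict, List, Any, Optional
--
-- def _determine_sanctions_type(topics: List[str]) -> str:
--     """Determine type of sanctions based on topics"""
--     topics_lower = [topic.lower() for topic in topics]
--
--     if any('sanction' in topic for topic in topics_lower):
--         return 'Economic Sanctions'
--     elif any('crime' in topic for topic in topics_lower):
--         return 'Criminal Activity'
--     elif any('pep' in topic for topic in topics_lower):
--         return 'Politically Exposed Person'
--     elif any('poi' in topic for topic in topics_lower):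
--         return 'Person of Interest'
--     elif any('terror' in topic for topic in topics_lower):
--         return 'Terrorism Related'
--     elif any('corrupt' in topic for topic in topics_lower):
--         return 'Corruption Related'
--     elif any('war' in topic for topic in topics_lower):
--         return 'War Crimes'
--     else:
--         return 'Other'
-- ===== SOURCE B (Python) =====
-- _KEYWORDS = ['sanction', 'crime', 'pep', 'poi', 'terror', 'corrupt', 'war']
-- _LABELS = ['Economic Sanctions', 'Criminal Activity', 'Politically Exposed Person',
--            'Person of Interest', 'Terrorism Related', 'Corruption Related',
--            'War Crimes', 'Other']
--
-- def _determine_sanctions_type(topics):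
--     """Single pass computing the minimum matching priority index (7 = no match)."""
--     best = len(_KEYWORDS)
--     for t in topics:
--         tl = t.lower()
--         for i, kw in enumerate(_KEYWORDS):
--             if i < best and kw in tl:
--                 best = i
--                 break
--     return _LABELS[best]
-- ===== Notes on version B (the rewrite author's own statement) =====
-- stated objective: alternative
-- what changed: B reduces the input in one pass to the minimum priority index of any matching keyword (maintaining a numeric best-rank accumulator with pruning and early break), then returns the label by table indexing, instead of A's up-to-seven separate any() scans over the whole list.
import Mathlib
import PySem

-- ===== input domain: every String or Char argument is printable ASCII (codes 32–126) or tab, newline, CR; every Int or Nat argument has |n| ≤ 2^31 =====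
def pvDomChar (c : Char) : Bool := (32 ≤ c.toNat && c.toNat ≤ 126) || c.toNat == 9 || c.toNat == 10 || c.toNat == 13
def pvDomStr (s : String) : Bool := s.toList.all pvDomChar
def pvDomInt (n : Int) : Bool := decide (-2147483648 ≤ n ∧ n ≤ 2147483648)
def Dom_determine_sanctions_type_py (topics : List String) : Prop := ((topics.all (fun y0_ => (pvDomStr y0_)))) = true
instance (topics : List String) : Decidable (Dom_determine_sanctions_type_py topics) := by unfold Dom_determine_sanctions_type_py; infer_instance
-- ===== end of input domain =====

-- B reduces the topics in one pass to the minimum matching priority index (7 = none),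
-- then returns the label by table indexing, instead of A's up-to-seven any() scans (objective: alternative).

-- ===== PORT A =====
def determine_sanctions_type_py (topics : List String) : String :=
  let topics_lower := topics.map (fun t => PySem.Str.lower t)
  if topics_lower.any (fun t => PySem.Str.isIn "sanction" t) then "Economic Sanctions"
  else if topics_lower.any (fun t => PySem.Str.isIn "crime" t) then "Criminal Activity"
  else if topics_lower.any (fun t => PySem.Str.isIn "pep" t) then "Politically Exposed Person"
  else if topics_lower.any (fun t => PySem.Str.isIn "poi" t) then "Person of Interest"
  else if topics_lower.any (fun t => PySem.Str.isIn "terror" t) then "Terrorism Related"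
  else if topics_lower.any (fun t => PySem.Str.isIn "corrupt" t) then "Corruption Related"
  else if topics_lower.any (fun t => PySem.Str.isIn "war" t) then "War Crimes"
  else "Other"

-- ===== PORT B =====
def pvKeywords : List String := ["sanction", "crime", "pep", "poi", "terror", "corrupt", "war"]
def pvLabels : List String :=
  ["Economic Sanctions", "Criminal Activity", "Politically Exposed Person",
   "Person of Interest", "Terrorism Related", "Corruption Related", "War Crimes", "Other"]

-- inner 'for i, kw in enumerate(_KEYWORDS): if i < best and kw in tl: best = i; break'
def pvScan (tl : String) (b : Int) : List (Int × String) → Int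
  | [] => b
  | (i, kw) :: ks => if i < b && PySem.Str.isIn kw tl then i else pvScan tl b ks

def determine_sanctions_type_py_alt (topics : List String) : String :=
  let best : Int := topics.foldl (fun b t => pvScan (PySem.Str.lower t) b (PySem.List.enumerate pvKeywords)) ((pvKeywords.length : Int))
  (PySem.List.pyGet? pvLabels best).getD ""   -- _LABELS[best]; best is always 0..7, in range

-- ===== PRECONDITION & SPEC =====
def Spec_determine_sanctions_type_py (topics : List String) (out : String) : Prop := out = determine_sanctions_type_py_alt topics
instance (topics : List String) (out : String) : Decidable (Spec_determine_sanctions_type_py topics out) := by unfold Spec_determine_sanctions_type_py; infer_instance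

-- ===== CLAIM (what is proved, stated in full; the proofs are below) =====
def Claim_equal_determine_sanctions_type_py : Prop := ∀ (topics : List String), Dom_determine_sanctions_type_py topics → Spec_determine_sanctions_type_py topics (determine_sanctions_type_py topics)

-- ===== LEMMAS AND PROOFS =====

-- the priority rank of a single lowered topic string
def pvRank (tl : String) : Int :=
  if PySem.Str.isIn "sanction" tl then 0
  else if PySem.Str.isIn "crime" tl then 1
  else if PySem.Str.isIn "pep" tl then 2
  else if PySem.Str.isIn "poi" tl then 3
  else if PySem.Str.isIn "terror" tl then 4
  else if PySem.Str.isIn "corrupt" tl then 5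
  else if PySem.Str.isIn "war" tl then 6
  else 7

-- the priority rank of the whole list, as A's any-tests decide it
def pvN (topics : List String) : Int :=
  if (topics.map (fun t => PySem.Str.lower t)).any (fun t => PySem.Str.isIn "sanction" t) then 0
  else if (topics.map (fun t => PySem.Str.lower t)).any (fun t => PySem.Str.isIn "crime" t) then 1
  else if (topics.map (fun t => PySem.Str.lower t)).any (fun t => PySem.Str.isIn "pep" t) then 2
  else if (topics.map (fun t => PySem.Str.lower t)).any (fun t => PySem.Str.isIn "poi" t) then 3
  else if (topics.map (fun t => PySem.Str.lower t)).any (fun t => PySem.Str.isIn "terror" t) then 4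
  else if (topics.map (fun t => PySem.Str.lower t)).any (fun t => PySem.Str.isIn "corrupt" t) then 5
  else if (topics.map (fun t => PySem.Str.lower t)).any (fun t => PySem.Str.isIn "war" t) then 6
  else 7

lemma pvN_nonneg_le (ts : List String) : 0 ≤ pvN ts ∧ pvN ts ≤ 7 := by
  unfold pvN; split_ifs <;> omega

-- index of the first matching pair, default d
def pvRrank (tl : String) (d : Int) : List (Int × String) → Int
  | [] => d
  | (i, kw) :: ps => if PySem.Str.isIn kw tl then i else pvRrank tl d ps

lemma pvRrank_ge (tl : String) (d i : Int) (ps : List (Int × String))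
    (h : ∀ p ∈ ps, i ≤ p.1) (hd : i ≤ d) : i ≤ pvRrank tl d ps := by
  induction ps with
  | nil => simpa [pvRrank]
  | cons p ps ih =>
    obtain ⟨j, kw⟩ := p
    simp only [pvRrank]
    split_ifs
    · exact h ⟨j, kw⟩ (by simp)
    · exact ih (fun q hq => h q (List.mem_cons_of_mem _ hq))

-- pruned first-match scan = min with the unpruned first-match rank
lemma pvScan_min (tl : String) (d : Int) (ps : List (Int × String)) (b : Int) (hb : b ≤ d)
    (hsort : ps.Pairwise (fun p q => p.1 ≤ q.1)) (hd : ∀ p ∈ ps, p.1 ≤ d) :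
    pvScan tl b ps = min b (pvRrank tl d ps) := by
  induction ps with
  | nil => simp only [pvScan, pvRrank]; omega
  | cons p ps ih =>
    obtain ⟨i, kw⟩ := p
    rw [List.pairwise_cons] at hsort
    have hrec : pvScan tl b ps = min b (pvRrank tl d ps) :=
      ih hsort.2 (fun q hq => hd q (List.mem_cons_of_mem _ hq))
    have hge : i ≤ pvRrank tl d ps :=
      pvRrank_ge tl d i ps hsort.1 (hd ⟨i, kw⟩ (by simp))
    by_cases hm : PySem.Chars.isIn kw.toList tl.toList = true
    · by_cases hib : i < b
      · simp [pvScan, pvRrank, hm, hib] <;> omega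
      · simp [pvScan, pvRrank, hm, hib, hrec] <;> omega
    · simp [pvScan, pvRrank, hm, hrec]

lemma pvScan_eq_min (tl : String) (b : Int) (hb : b ≤ 7) :
    pvScan tl b (PySem.List.enumerate pvKeywords) = min b (pvRank tl) := by
  rw [pvScan_min tl 7 (PySem.List.enumerate pvKeywords) b hb (by decide) (by decide)]
  rfl

lemma pvChain : ∀ (x1 x2 x3 x4 x5 x6 x7 a1 a2 a3 a4 a5 a6 a7 : Bool),
    (if (x1 || a1) then (0:Int) else if (x2 || a2) then 1 else if (x3 || a3) then 2
     else if (x4 || a4) then 3 else if (x5 || a5) then 4 else if (x6 || a6) then 5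
     else if (x7 || a7) then 6 else 7)
      = min (if x1 then (0:Int) else if x2 then 1 else if x3 then 2 else if x4 then 3
             else if x5 then 4 else if x6 then 5 else if x7 then 6 else 7)
            (if a1 then (0:Int) else if a2 then 1 else if a3 then 2 else if a4 then 3
             else if a5 then 4 else if a6 then 5 else if a7 then 6 else 7) := by
  decide

lemma pvN_cons (t : String) (ts : List String) :
    pvN (t :: ts) = min (pvRank (PySem.Str.lower t)) (pvN ts) := by
  simp only [pvN, pvRank, List.map_cons, List.any_cons]
  exact pvChain _ _ _ _ _ _ _ _ _ _ _ _ _ _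

lemma pv_fold_eq (ts : List String) (b : Int) (hb0 : 0 ≤ b) (hb : b ≤ 7) :
    ts.foldl (fun b t => pvScan (PySem.Str.lower t) b (PySem.List.enumerate pvKeywords)) b
      = min b (pvN ts) := by
  induction ts generalizing b with
  | nil =>
    unfold pvN; simp; omega
  | cons t ts ih =>
    have hr : 0 ≤ pvRank (PySem.Str.lower t) ∧ pvRank (PySem.Str.lower t) ≤ 7 := by
      unfold pvRank; split_ifs <;> omega
    rw [List.foldl_cons, pvScan_eq_min _ _ hb, ih _ (by omega) (by omega), pvN_cons]
    omega

lemma pvA_eq_label (ts : List String) :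
    determine_sanctions_type_py ts = (PySem.List.pyGet? pvLabels (pvN ts)).getD "" := by
  simp only [determine_sanctions_type_py, pvN]
  split_ifs <;> rfl

-- ===== VERDICT (by name: the statement is the Claim_ definition above) =====
theorem determine_sanctions_type_py_spec : Claim_equal_determine_sanctions_type_py := by
  intro topics _
  show determine_sanctions_type_py topics = determine_sanctions_type_py_alt topics
  rw [pvA_eq_label]
  simp only [determine_sanctions_type_py_alt]
  rw [show ((pvKeywords.length : Int)) = 7 from by norm_num [pvKeywords]]
  rw [pv_fold_eq _ 7 (by omega) (by omega)]
  have h := pvN_nonneg_le topics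
  rw [show min (7 : Int) (pvN topics) = pvN topics from by omega]
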